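-- pv_equiv track=rewrite | github.com/36yi/Algorithm | Topcoder/NumberMagicEasy.py | theNumber
-- ===== SOURCE A (Python) =====
-- def theNumber(answer):
--     c = ['YYYY',
--          'YYYN',
--          'YYNY',
--          'YYNN',
--          'YNYY',
--          'YNYN',
--          'YNNY',
--          'YNNN',
--          'NYYY',
--          'NYYN',
--          'NYNY',
--          'NYNN',
--          'NNYY',
--          'NNYN',
--          'NNNY',
--          'NNNN',
--          'NNNN']
--     for i in range(16):
--         if(c[i] == answer):
--             return i + 1
--     return 0
-- ===== SOURCE B (Python) =====
-- def theNumber(answer):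
--     # The table is the 4-bit binary encoding Y=0, N=1, MSB first;
--     # a valid answer's position is its numeric value plus one.
--     if not (isinstance(answer, str) and len(answer) == 4 and all(ch in 'YN' for ch in answer)):
--         return 0
--     v = 0
--     for ch in answer:
--         v = v * 2 + (1 if ch == 'N' else 0)
--     return v + 1
-- ===== Notes on version B (the rewrite author's own statement) =====
-- stated objective: simpler
-- what changed: Replaces the linear scan over the 17-entry literal table with validation plus a closed-form fold: the answer is read as a 4-bit binary number (Y=0, N=1, MSB first) and its value plus one is the index.
import Mathlib
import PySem

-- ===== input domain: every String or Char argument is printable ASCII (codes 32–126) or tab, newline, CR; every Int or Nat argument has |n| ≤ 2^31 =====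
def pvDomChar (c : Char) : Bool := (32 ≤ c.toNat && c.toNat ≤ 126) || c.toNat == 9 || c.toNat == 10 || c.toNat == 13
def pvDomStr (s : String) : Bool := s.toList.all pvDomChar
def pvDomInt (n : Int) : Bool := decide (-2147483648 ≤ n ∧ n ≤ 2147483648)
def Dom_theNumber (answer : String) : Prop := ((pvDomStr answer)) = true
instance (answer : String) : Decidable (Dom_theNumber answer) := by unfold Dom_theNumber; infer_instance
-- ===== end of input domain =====

-- B replaces A's linear scan over a literal 17-entry table by input validation plus a
-- closed-form computation (the answer read as a 4-bit binary number, Y=0/N=1, MSB first): simpler.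


-- ===== PORT A =====
-- the literal table c of A (17 entries, as in the source)
def pvTable : List String :=
  ["YYYY", "YYYN", "YYNY", "YYNN", "YNYY", "YNYN", "YNNY", "YNNN",
   "NYYY", "NYYN", "NYNY", "NYNN", "NNYY", "NNYN", "NNNY", "NNNN", "NNNN"]

-- 'for i in range(16): if c[i] == answer: return i + 1' / 'return 0'
def pvScanA (answer : String) : List Int → Int
  | [] => 0
  | i :: rest =>
    match PySem.List.pyGet? pvTable i with
    | some s => if (s == answer) then i + 1 else pvScanA answer rest
    | none => pvScanA answer rest   -- unreachable: every i of range(16) is in range of the 17-entry table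

def theNumber (answer : String) : Int :=
  pvScanA answer (PySem.List.pyRange 0 16 1)

-- ===== PORT B =====
def theNumber_alt (answer : String) : Int :=
  let cs := answer.toList
  if (cs.length == 4 && cs.all (fun ch => ch == 'Y' || ch == 'N')) then
    cs.foldl (fun v ch => v * 2 + (if ch == 'N' then (1 : Int) else 0)) 0 + 1
  else 0

-- ===== PRECONDITION & SPEC =====
def Spec_theNumber (answer : String) (out : Int) : Prop := out = theNumber_alt answer
instance (answer : String) (out : Int) : Decidable (Spec_theNumber answer out) := by unfold Spec_theNumber; infer_instance

-- ===== CLAIM (what is proved, stated in full; the proofs are below) =====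
def Claim_equal_theNumber : Prop := ∀ (answer : String), Dom_theNumber answer → Spec_theNumber answer (theNumber answer)

-- ===== LEMMAS AND PROOFS =====

-- the scan returns 0 when no table entry equals the answer
theorem pvScanA_eq_zero (answer : String) (l : List Int)
    (h : ∀ s ∈ pvTable, (s == answer) = false) : pvScanA answer l = 0 := by
  induction l with
  | nil => rfl
  | cons i rest ih =>
    simp only [pvScanA]
    cases hg : PySem.List.pyGet? pvTable i with
    | none => exact ih
    | some s =>
      show (if (s == answer) = true then i + 1 else pvScanA answer rest) = 0
      rw [h s (PySem.List.mem_of_pyGet?_eq_some _ hg), if_neg (by simp)]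
      exact ih

theorem pv_main (answer : String) : theNumber answer = theNumber_alt answer := by
  by_cases hb :
      (answer.toList.length == 4 &&
        answer.toList.all (fun ch => ch == 'Y' || ch == 'N')) = true
  · -- valid 4-character Y/N answer: 16 concrete cases
    obtain ⟨hlen, hall⟩ := Bool.and_eq_true_iff.mp hb
    rw [beq_iff_eq] at hlen
    obtain ⟨a, b, c, d, hcs⟩ : ∃ a b c d, answer.toList = [a, b, c, d] := by
      rcases h : answer.toList with _ | ⟨a, _ | ⟨b, _ | ⟨c, _ | ⟨d, _ | ⟨e, t⟩⟩⟩⟩⟩ <;>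
        rw [h] at hlen <;> simp at hlen
      exact ⟨a, b, c, d, rfl⟩
    have hans : answer = String.ofList [a, b, c, d] := by rw [← hcs]; simp
    subst hans
    simp only [hcs, List.all_cons, List.all_nil, Bool.and_true, Bool.and_eq_true,
      Bool.or_eq_true, beq_iff_eq] at hall
    obtain ⟨ha | ha, hb' | hb', hc | hc, hd | hd⟩ := hall <;>
      subst ha hb' hc hd <;> decide
  · -- invalid answer: both sides return 0
    have hne : ∀ s ∈ pvTable, (s == answer) = false := by
      intro s hs
      rw [beq_eq_false_iff_ne]
      rintro rfl
      fin_cases hs <;> exact hb (by decide)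
    rw [theNumber, pvScanA_eq_zero answer _ hne, theNumber_alt]
    rw [if_neg (fun h => hb h)]

-- ===== VERDICT (by name: the statement is the Claim_ definition above) =====
theorem theNumber_spec : Claim_equal_theNumber := by
  intro answer _
  unfold Spec_theNumber
  exact pv_main answer
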